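-- pv_equiv track=rewrite | github.com/hogan-tech/leetcode-solution | Python/3602-hexadecimal-and-hexatrigesimal-conversion.py | concatHex36
-- ===== SOURCE A (Python) =====
-- def concatHex36(n: int) -> str:
--     def Base36(num: int) -> str:
--         if num == 0:
--             return '0'
--
--         chars = '0123456789ABCDEFGHIJKLMNOPQRSTUVWXYZ'
--         result = ''
--
--         while num > 0:
--             num, remain = divmod(num, 36)
--             result = chars[remain] + result
--
--         return result
--
--     return hex(n**2)[2:].upper() + Base36(n**3)
-- ===== SOURCE B (Python) =====
-- def concatHex36(n: int) -> str:
--     DIGITS = '0123456789ABCDEFGHIJKLMNOPQRSTUVWXYZ'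
--
--     def convert(num: int, base: int) -> str:
--         # most-significant-digit-first: find the largest power of base <= num,
--         # then peel digits off the top by dividing by descending powers
--         if num <= 0:
--             return '0' if num == 0 else ''
--         p = 1
--         while p * base <= num:
--             p *= base
--         out = []
--         while p > 0:
--             out.append(DIGITS[num // p])
--             num %= p
--             p //= base
--         return ''.join(out)
--
--     return convert(n ** 2, 16) + convert(n ** 3, 36)
-- ===== Notes on version B (the rewrite author's own statement) =====
-- stated objective: alternative
-- what changed: Both halves are converted most-significant-digit-first: B finds the largest power of the base not exceeding the number and peels digits off the top by dividing by descending powers, instead of A's least-significant-first divmod loop with string prepending and the hex() library call.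
import Mathlib
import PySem

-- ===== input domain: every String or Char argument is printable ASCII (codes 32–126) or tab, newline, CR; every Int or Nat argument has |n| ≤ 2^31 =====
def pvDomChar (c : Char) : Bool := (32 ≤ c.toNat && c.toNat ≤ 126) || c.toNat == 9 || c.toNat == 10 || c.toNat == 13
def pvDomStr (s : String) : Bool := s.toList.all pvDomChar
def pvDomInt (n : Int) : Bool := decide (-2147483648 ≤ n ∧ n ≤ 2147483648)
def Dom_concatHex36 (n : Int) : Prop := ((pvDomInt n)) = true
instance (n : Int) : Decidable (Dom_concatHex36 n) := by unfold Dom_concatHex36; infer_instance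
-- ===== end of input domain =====

-- B converts both halves most-significant-digit-first (largest power of the base, then division by
-- descending powers), replacing A's hex() call and least-significant-first divmod/prepend loop;
-- proved equal for all n (objective: alternative).

-- ===== PORT A =====
-- chars = '0123456789ABCDEFGHIJKLMNOPQRSTUVWXYZ'
def pvChars36 : List Char := "0123456789ABCDEFGHIJKLMNOPQRSTUVWXYZ".toList

-- A's while loop in Base36: result = chars[remain] + result.  Entered only with num > 0,
-- where Python's divmod(num, 36) is Nat div/mod; remain < 36 so getD's default is never used.
def pvBase36LoopA (num : Nat) (result : List Char) : List Char :=
  if num > 0 then pvBase36LoopA (num / 36) (pvChars36.getD (num % 36) '?' :: result) else result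

-- def Base36(num): the 'if num == 0' branch, then the while loop (which leaves '' for num < 0)
def pvBase36A (num : Int) : String :=
  if num = 0 then "0"
  else if 0 < num then String.ofList (pvBase36LoopA num.toNat []) else ""

-- hex(m) for m ≥ 0 (here m = n² ≥ 0), digit by digit; exact for a nonnegative argument
def pvHexLoop (num : Nat) (result : List Char) : List Char :=
  if num > 0 then pvHexLoop (num / 16) ("0123456789abcdef".toList.getD (num % 16) '?' :: result) else result

def pvHexList (m : Nat) : List Char :=
  "0x".toList ++ (if m = 0 then ['0'] else pvHexLoop m [])

-- hex(n**2)[2:].upper() + Base36(n**3), the [2:] slice and .upper() on the code-point list (exact wrappers)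
def concatHex36 (n : Int) : String :=
  String.ofList (PySem.Chars.upper (PySem.Chars.slice (pvHexList (n ^ 2).toNat) (some 2) none))
    ++ pvBase36A (n ^ 3)

-- ===== PORT B =====
-- B's first while loop: p *= base while p * base <= num; fuel (= num) only makes it total
def pvPowLoopB (b : Nat) (fuel p num : Nat) : Nat :=
  match fuel with
  | 0 => p
  | f + 1 => if p * b ≤ num then pvPowLoopB b f (p * b) num else p

-- B's second while loop: out.append(DIGITS[num // p]); num %= p; p //= base
def pvDigLoopB (b : Nat) (fuel p num : Nat) (out : List Char) : List Char :=
  match fuel with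
  | 0 => out
  | f + 1 =>
    if p > 0 then pvDigLoopB b f (p / b) (num % p) (out ++ [pvChars36.getD (num / p) '?'])
    else out

-- def convert(num, base): '0'/'' for num <= 0, else the two loops and ''.join(out)
def pvConvertB (num : Int) (b : Nat) : String :=
  if num ≤ 0 then (if num = 0 then "0" else "")
  else
    let m := num.toNat
    let p := pvPowLoopB b m 1 m
    String.ofList (pvDigLoopB b p p m [])

def concatHex36_alt (n : Int) : String := pvConvertB (n ^ 2) 16 ++ pvConvertB (n ^ 3) 36

-- ===== PRECONDITION & SPEC =====
def Spec_concatHex36 (n : Int) (out : String) : Prop := out = concatHex36_alt n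
instance (n : Int) (out : String) : Decidable (Spec_concatHex36 n out) := by unfold Spec_concatHex36; infer_instance

-- ===== CLAIM (what is proved, stated in full; the proofs are below) =====
def Claim_equal_concatHex36 : Prop := ∀ (n : Int), Dom_concatHex36 n → Spec_concatHex36 n (concatHex36 n)

-- ===== LEMMAS AND PROOFS =====

-- big-endian digit list peeled off by descending powers (proof-only model of B's second loop)
def pvBigD (b : Nat) : Nat → Nat → List Nat
  | 0, num => [num]
  | k + 1, num => num / b ^ (k + 1) :: pvBigD b k (num % b ^ (k + 1))

theorem pvDigLoopB_p0 (b fuel num : Nat) (out : List Char) :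
    pvDigLoopB b fuel 0 num out = out := by cases fuel <;> simp [pvDigLoopB]

-- B's digit loop at p = b^k produces the k+1 big-endian digits
theorem pvDigLoopB_eq (b : Nat) (hb : 2 ≤ b) :
    ∀ k fuel num out, k < fuel →
      pvDigLoopB b fuel (b ^ k) num out
        = out ++ (pvBigD b k num).map (fun d => pvChars36.getD d '?') := by
  intro k
  induction k with
  | zero =>
    intro fuel num out hf
    obtain ⟨f, rfl⟩ : ∃ f, fuel = f + 1 := ⟨fuel - 1, by omega⟩
    have h1 : (1 : Nat) / b = 0 := Nat.div_eq_of_lt (by omega)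
    simp [pvDigLoopB, pvBigD, h1, pvDigLoopB_p0]
  | succ k ih =>
    intro fuel num out hf
    obtain ⟨f, rfl⟩ : ∃ f, fuel = f + 1 := ⟨fuel - 1, by omega⟩
    have hp : 0 < b ^ (k + 1) := Nat.pow_pos (by omega)
    have hdiv : b ^ (k + 1) / b = b ^ k := by
      rw [pow_succ, Nat.mul_div_cancel _ (by omega : 0 < b)]
    simp only [pvDigLoopB, if_pos hp, hdiv]
    rw [ih f (num % b ^ (k + 1)) _ (by omega)]
    simp [pvBigD]

-- B's power loop returns the largest power of b not exceeding num
theorem pvPowLoopB_spec (b : Nat) (hb : 2 ≤ b) (num : Nat) :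
    ∀ fuel p, 0 < p → p ≤ num → num < p * b ^ fuel →
      ∃ k, pvPowLoopB b fuel p num = p * b ^ k ∧ p * b ^ k ≤ num ∧ num < p * b ^ k * b := by
  intro fuel
  induction fuel with
  | zero => intro p hp hle hlt; simp at hlt; omega
  | succ f ih =>
    intro p hp hle hlt
    by_cases h : p * b ≤ num
    · obtain ⟨k, hk1, hk2, hk3⟩ := ih (p * b) (by positivity) h
        (by rw [pow_succ] at hlt
            calc num < p * (b ^ f * b) := hlt
              _ = p * b * b ^ f := by ring)
      refine ⟨k + 1, ?_, ?_, ?_⟩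
      · simp only [pvPowLoopB, if_pos h, hk1]; ring
      · rw [pow_succ]
        calc p * (b ^ k * b) = p * b * b ^ k := by ring
          _ ≤ num := hk2
      · rw [pow_succ]
        calc num < p * b * b ^ k * b := hk3
          _ = p * (b ^ k * b) * b := by ring
    · exact ⟨0, by simp [pvPowLoopB, if_neg h], by simpa using hle,
        by simpa using Nat.lt_of_not_le h⟩

-- adding d·b^k on top of r < b^k appends zero-padding and the digit d
theorem pvDigits_pad (b : Nat) (hb : 2 ≤ b) (d : Nat) (hd0 : 0 < d) (hdb : d < b) :
    ∀ k r, r < b ^ k →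
      Nat.digits b (r + d * b ^ k)
        = (Nat.digits b r ++ List.replicate (k - (Nat.digits b r).length) 0) ++ [d] := by
  intro k
  induction k with
  | zero =>
    intro r hr
    have hr0 : r = 0 := by simpa using hr
    subst hr0
    rw [Nat.digits_def' (by omega : 1 < b) (by simpa using hd0)]
    simp [Nat.mod_eq_of_lt hdb, Nat.div_eq_of_lt hdb]
  | succ k ih =>
    intro r hr
    have hnum : 0 < r + d * b ^ (k + 1) := by positivity
    rw [Nat.digits_def' (by omega : 1 < b) hnum]
    have hmod : (r + d * b ^ (k + 1)) % b = r % b := by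
      rw [pow_succ, ← mul_assoc]; exact Nat.add_mul_mod_self_right r _ b
    have hdivn : (r + d * b ^ (k + 1)) / b = r / b + d * b ^ k := by
      rw [pow_succ, ← mul_assoc]; exact Nat.add_mul_div_right r _ (by omega : 0 < b)
    have hrb : r / b < b ^ k := by
      rw [Nat.div_lt_iff_lt_mul (by omega : 0 < b), ← pow_succ]; exact hr
    rcases Nat.eq_zero_or_pos r with hr0 | hrpos
    · subst hr0
      rw [hmod, hdivn]
      simp only [Nat.zero_div, Nat.zero_add, Nat.zero_mod]
      rw [show d * b ^ k = 0 + d * b ^ k by simp, ih 0 (Nat.pow_pos (by omega))]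
      simp [List.replicate_succ]
    · rw [hmod, hdivn, ih (r / b) hrb,
        Nat.digits_def' (by omega : 1 < b) hrpos]
      simp [Nat.succ_sub_succ]

-- digit-count bound from a power bound
theorem pvDigitsLenLe (b : Nat) (hb : 2 ≤ b) (k num : Nat) (h : num < b ^ k) :
    (Nat.digits b num).length ≤ k := by
  by_contra hc
  have hc' : k + 1 ≤ (Nat.digits b num).length := by omega
  have hne : num ≠ 0 := by
    intro h0; subst h0; simp at hc'
  have h1 : b ^ (Nat.digits b num).length ≤ b * num :=
    Nat.base_pow_length_digits_le b num (by omega) hne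
  have h2 : b ^ (k + 1) ≤ b ^ (Nat.digits b num).length :=
    Nat.pow_le_pow_right (by omega) hc'
  rw [pow_succ] at h2
  have : b ^ k * b ≤ b * num := le_trans h2 h1
  have : b ^ k ≤ num := by
    have hbpos : 0 < b := by omega
    nlinarith
  omega

theorem pvDigitsLenGt (b : Nat) (hb : 2 ≤ b) (k num : Nat) (h : b ^ k ≤ num) :
    k < (Nat.digits b num).length := by
  have h1 : num < b ^ (Nat.digits b num).length :=
    Nat.lt_base_pow_length_digits (by omega)
  exact (Nat.pow_lt_pow_iff_right (by omega)).mp (lt_of_le_of_lt h h1)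

-- the big-endian digit list is the zero-padded reverse of Nat.digits
theorem pvBigD_eq (b : Nat) (hb : 2 ≤ b) :
    ∀ k num, num < b ^ (k + 1) →
      pvBigD b k num
        = List.replicate (k + 1 - (Nat.digits b num).length) 0 ++ (Nat.digits b num).reverse := by
  intro k
  induction k with
  | zero =>
    intro num h
    rcases Nat.eq_zero_or_pos num with h0 | hpos
    · subst h0; simp [pvBigD]
    · rw [Nat.digits_def' (by omega : 1 < b) hpos]
      have : num / b = 0 := Nat.div_eq_of_lt (by simpa using h)
      simp [pvBigD, this, Nat.mod_eq_of_lt (by simpa using h)]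
  | succ k ih =>
    intro num h
    have hp : 0 < b ^ (k + 1) := Nat.pow_pos (by omega)
    have hrlt : num % b ^ (k + 1) < b ^ (k + 1) := Nat.mod_lt _ hp
    rcases Nat.eq_zero_or_pos (num / b ^ (k + 1)) with hd0 | hdpos
    · have hnum : num < b ^ (k + 1) := by
        rcases Nat.lt_or_ge num (b ^ (k + 1)) with h' | h'
        · exact h'
        · exfalso; have := Nat.div_pos h' hp; omega
      have hmod : num % b ^ (k + 1) = num := Nat.mod_eq_of_lt hnum
      have hlen : (Nat.digits b num).length ≤ k + 1 := pvDigitsLenLe b hb _ _ hnum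
      simp only [pvBigD, hd0, hmod]
      rw [ih num hnum]
      have : k + 1 + 1 - (Nat.digits b num).length
          = (k + 1 - (Nat.digits b num).length) + 1 := by omega
      rw [this, List.replicate_succ]
      simp
    · set d := num / b ^ (k + 1) with hd
      set r := num % b ^ (k + 1) with hrdef
      have hdb : d < b := by
        rw [hd, Nat.div_lt_iff_lt_mul hp]
        calc num < b ^ (k + 1 + 1) := h
          _ ≤ b * b ^ (k + 1) := by rw [← pow_succ']
      have hnum : r + d * b ^ (k + 1) = num := Nat.mod_add_div' num (b ^ (k + 1))
      have hlenr : (Nat.digits b r).length ≤ k + 1 := pvDigitsLenLe b hb _ _ hrlt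
      have hdig : Nat.digits b num
          = (Nat.digits b r ++ List.replicate (k + 1 - (Nat.digits b r).length) 0) ++ [d] := by
        rw [← hnum]; exact pvDigits_pad b hb d hdpos hdb (k + 1) r hrlt
      simp only [pvBigD, ← hd, ← hrdef]
      rw [ih r hrlt, hdig]
      have hlen0 : k + 1 + 1
          - ((Nat.digits b r).length + ((k + 1 - (Nat.digits b r).length) + 1)) = 0 := by omega
      simp [List.reverse_append, hlen0]

-- A's base-36 loop is the reversed little-endian digit string
theorem pvBase36LoopA_digits (num : Nat) : ∀ res,
    pvBase36LoopA num res
      = ((Nat.digits 36 num).map (fun d => pvChars36.getD d '?')).reverse ++ res := by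
  induction num using Nat.strong_induction_on with
  | _ num ih =>
    intro res
    by_cases h : num > 0
    · rw [pvBase36LoopA, if_pos h, ih (num / 36) (Nat.div_lt_self h (by omega)),
        Nat.digits_def' (by norm_num : 1 < 36) h]
      simp
    · rw [pvBase36LoopA, if_neg h]
      have : num = 0 := by omega
      simp [this]

-- A's hex loop likewise, with the lowercase digit alphabet
theorem pvHexLoop_digits (num : Nat) : ∀ res,
    pvHexLoop num res
      = ((Nat.digits 16 num).map (fun d => "0123456789abcdef".toList.getD d '?')).reverse ++ res := by
  induction num using Nat.strong_induction_on with
  | _ num ih =>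
    intro res
    by_cases h : num > 0
    · rw [pvHexLoop, if_pos h, ih (num / 16) (Nat.div_lt_self h (by omega)),
        Nat.digits_def' (by norm_num : 1 < 16) h]
      simp
    · rw [pvHexLoop, if_neg h]
      have : num = 0 := by omega
      simp [this]

-- uppercasing a lowercase hex digit gives the shared 0-9A-Z alphabet's digit
theorem pvUpperDigit (r : Nat) (hr : r < 16) :
    PySem.Chars.upperChar ("0123456789abcdef".toList.getD r '?') = pvChars36.getD r '?' := by
  interval_cases r <;> decide

-- B's convert at a positive argument yields the reversed digit string
theorem pvConvertB_pos (b : Nat) (hb : 2 ≤ b) (m : Nat) (hm : 0 < m) :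
    pvConvertB (m : Int) b
      = String.ofList ((Nat.digits b m).map (fun d => pvChars36.getD d '?')).reverse := by
  have hle : ¬ ((m : Int) ≤ 0) := by exact_mod_cast Nat.not_le.mpr hm
  rw [pvConvertB, if_neg hle]
  have htn : ((m : Int)).toNat = m := Int.toNat_natCast m
  simp only [htn]
  obtain ⟨k, hk1, hk2, hk3⟩ := pvPowLoopB_spec b hb m m 1 (by omega) hm
    (by simpa using Nat.lt_pow_self (by omega : 1 < b))
  simp only [one_mul] at hk1 hk2 hk3
  rw [hk1]
  have hfuel : k < b ^ k := lt_of_lt_of_le Nat.lt_two_pow_self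
    (Nat.pow_le_pow_left (by omega) k)
  rw [pvDigLoopB_eq b hb k (b ^ k) m [] hfuel]
  have hlt : m < b ^ (k + 1) := by rw [pow_succ]; exact hk3
  rw [pvBigD_eq b hb k m hlt]
  have hlen : (Nat.digits b m).length = k + 1 := by
    have := pvDigitsLenLe b hb (k + 1) m hlt
    have := pvDigitsLenGt b hb k m hk2
    omega
  rw [hlen]
  simp [List.map_reverse]

-- the base-36 halves agree
theorem pvBase36_agree (m : Int) : pvBase36A m = pvConvertB m 36 := by
  by_cases h0 : m = 0
  · simp [pvBase36A, pvConvertB, h0]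
  · by_cases hpos : 0 < m
    · have hm : (((m.toNat : Nat) : Int)) = m := Int.toNat_of_nonneg (by omega)
      rw [pvBase36A, if_neg h0, if_pos hpos, ← hm,
        pvConvertB_pos 36 (by norm_num) m.toNat (by omega)]
      rw [Int.toNat_natCast, pvBase36LoopA_digits m.toNat []]
      simp
    · rw [pvBase36A, if_neg h0, if_neg hpos, pvConvertB,
        if_pos (by omega : m ≤ 0), if_neg h0]

-- the hex halves agree (argument m = n² ≥ 0)
theorem pvHex_agree (m : Nat) :
    String.ofList (PySem.Chars.upper (PySem.Chars.slice (pvHexList m) (some 2) none))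
      = pvConvertB (m : Int) 16 := by
  have hsl : PySem.Chars.slice (pvHexList m) (some 2) none
      = (if m = 0 then ['0'] else pvHexLoop m []) := by
    simp [pvHexList, PySem.Chars.slice_eq_listSlice]
    rw [show ((2 : Int)) = ((2 : Nat) : Int) by norm_num, PySem.List.slice_from_natCast]
    rfl
  rw [hsl]
  by_cases h0 : m = 0
  · subst h0
    simp [pvConvertB, PySem.Chars.upper]
    decide
  · rw [if_neg h0, pvConvertB_pos 16 (by norm_num) m (by omega),
      pvHexLoop_digits m []]
    simp only [List.append_nil, PySem.Chars.upper, List.map_reverse, List.map_map]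
    congr 2
    apply List.map_congr_left
    intro d hd
    exact pvUpperDigit d (Nat.digits_lt_base (by norm_num) hd)

-- ===== VERDICT (by name: the statement is the Claim_ definition above) =====
theorem concatHex36_spec : Claim_equal_concatHex36 := by
  intro n _
  unfold Spec_concatHex36 concatHex36 concatHex36_alt
  rw [pvBase36_agree]
  congr 1
  have hnn : (0 : Int) ≤ n ^ 2 := by positivity
  have hcast : ((n ^ 2).toNat : Int) = n ^ 2 := Int.toNat_of_nonneg hnn
  rw [← hcast]
  exact pvHex_agree (n ^ 2).toNat
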